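-- pv_equiv track=rewrite | github.com/Vishalsng112/daisy | src/analysis/results_reader.py | _oracle_here_would_fix
-- ===== SOURCE A (Python) =====
-- def _oracle_here_would_fix(
--     found_positions: list[int],
--     all_options: list,
-- ) -> bool:
--     """Check if any found position appears in any oracle option."""
--     # Normalize: if all_options is a flat list of ints, wrap it
--     if all_options and isinstance(all_options[0], int):
--         all_options = [all_options]
--     valid = {pos for option in all_options for pos in option}
--     return any(pos in valid for pos in found_positions)
-- ===== SOURCE B (Python) =====
-- def _oracle_here_would_fix(
--     found_positions: list[int],
--     all_options: list,
-- ) -> bool: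
--     """Check if any found position appears in any oracle option."""
--     # Normalize: if all_options is a flat list of ints, wrap it
--     if all_options and isinstance(all_options[0], int):
--         all_options = [all_options]
--     # Reversed-direction scan: walk each option's elements and
--     # test each against found_positions, returning at the first hit.
--     for option in all_options:
--         for x in option:
--             if x in found_positions:
--                 return True
--     return False
-- ===== Notes on version B (the rewrite author's own statement) =====
-- stated objective: simpler
-- what changed: Builds no union set and reverses the scan direction: instead of materialising the set of all option elements and asking for each found position whether it is in the set, B walks each option's elements with explicit loops and returns at the first element that occurs in found_positions.
import Mathlib
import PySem

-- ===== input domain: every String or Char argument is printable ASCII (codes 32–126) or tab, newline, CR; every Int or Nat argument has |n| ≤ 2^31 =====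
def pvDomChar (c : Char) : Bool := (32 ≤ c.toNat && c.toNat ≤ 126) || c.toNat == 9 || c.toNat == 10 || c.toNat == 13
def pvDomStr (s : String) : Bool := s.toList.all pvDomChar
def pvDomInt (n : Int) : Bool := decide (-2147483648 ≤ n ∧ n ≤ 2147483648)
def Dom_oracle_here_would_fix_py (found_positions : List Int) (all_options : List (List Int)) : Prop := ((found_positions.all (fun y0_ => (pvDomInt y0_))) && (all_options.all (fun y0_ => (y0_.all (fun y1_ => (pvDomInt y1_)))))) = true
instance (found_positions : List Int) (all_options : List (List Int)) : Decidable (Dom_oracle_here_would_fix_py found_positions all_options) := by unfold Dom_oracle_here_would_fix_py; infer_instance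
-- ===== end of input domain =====

-- B drops A's union set and reverses the scan: explicit recursion over each option's elements,
-- testing each against found_positions and stopping at the first hit (simpler: no auxiliary set).


-- ===== PORT A =====
-- Port of A. Under the typed signature all_options : List (List Int), the Python
-- isinstance-normalization guard can never fire (elements are lists, not ints), so it is omitted.
def oracle_here_would_fix_py (found_positions : List Int) (all_options : List (List Int)) : Bool :=
  let valid : PySem.Set Int := PySem.Set.ofList (all_options.flatMap (fun option => option))
  found_positions.any (fun pos => PySem.Set.contains valid pos)

-- ===== PORT B =====
-- inner loop of B: walk one option's elements, test each against found_positions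
def pvScanOption (found_positions : List Int) : List Int → Bool
  | [] => false
  | x :: xs => if x ∈ found_positions then true else pvScanOption found_positions xs

-- outer loop of B: walk the options
def pvScanOptions (found_positions : List Int) : List (List Int) → Bool
  | [] => false
  | o :: os => if pvScanOption found_positions o then true else pvScanOptions found_positions os

def oracle_here_would_fix_py_alt (found_positions : List Int) (all_options : List (List Int)) : Bool :=
  pvScanOptions found_positions all_options

-- ===== PRECONDITION & SPEC =====
def Spec_oracle_here_would_fix_py (found_positions : List Int) (all_options : List (List Int)) (out : Bool) : Prop := out = oracle_here_would_fix_py_alt found_positions all_options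
instance (found_positions : List Int) (all_options : List (List Int)) (out : Bool) : Decidable (Spec_oracle_here_would_fix_py found_positions all_options out) := by unfold Spec_oracle_here_would_fix_py; infer_instance

-- ===== CLAIM (what is proved, stated in full; the proofs are below) =====
def Claim_equal_oracle_here_would_fix_py : Prop := ∀ (found_positions : List Int) (all_options : List (List Int)), Dom_oracle_here_would_fix_py found_positions all_options → Spec_oracle_here_would_fix_py found_positions all_options (oracle_here_would_fix_py found_positions all_options)

-- ===== LEMMAS AND PROOFS =====
theorem pvScanOption_iff (fs : List Int) (o : List Int) :
    pvScanOption fs o = true ↔ ∃ x ∈ o, x ∈ fs := by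
  induction o with
  | nil => simp [pvScanOption]
  | cons x xs ih =>
    simp only [pvScanOption]
    split_ifs with h
    · simp [h]
    · simp [ih, h]

theorem pvScanOptions_iff (fs : List Int) (os : List (List Int)) :
    pvScanOptions fs os = true ↔ ∃ o ∈ os, ∃ x ∈ o, x ∈ fs := by
  induction os with
  | nil => simp [pvScanOptions]
  | cons o os ih =>
    simp only [pvScanOptions]
    split_ifs with h
    · simp [pvScanOption_iff fs o |>.mp h]
    · rw [ih]
      constructor
      · rintro ⟨o', ho', hx⟩; exact ⟨o', List.mem_cons_of_mem _ ho', hx⟩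
      · rintro ⟨o', ho', hx⟩
        rcases List.mem_cons.mp ho' with rfl | ho'
        · exact absurd ((pvScanOption_iff fs o').mpr hx) (by simp [h])
        · exact ⟨o', ho', hx⟩

-- ===== VERDICT (by name: the statement is the Claim_ definition above) =====
theorem oracle_here_would_fix_py_spec : Claim_equal_oracle_here_would_fix_py := by
  intro fs os _
  unfold Spec_oracle_here_would_fix_py oracle_here_would_fix_py oracle_here_would_fix_py_alt
  rw [Bool.eq_iff_iff, pvScanOptions_iff]
  simp only [List.any_eq_true, decide_eq_true_eq, PySem.Set.contains, List.contains_eq_mem,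
    PySem.Set.mem_ofList, List.mem_flatMap]
  constructor
  · rintro ⟨p, hp, o, ho, hpo⟩; exact ⟨o, ho, p, hpo, hp⟩
  · rintro ⟨o, ho, p, hpo, hp⟩; exact ⟨p, hp, o, ho, hpo⟩
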